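-- pv_equiv track=rewrite | github.com/alexhuf/foodai | analyze_weekly_weight_gain_focus.py | build_ablation_sets
-- ===== SOURCE A (Python) =====
-- from typing import Dict, List, Optional
--
-- def classify_feature_group(col: str) -> str:
--     c = col.lower()
--     weather_keys = [
--         "temperature", "apparent_temperature", "precip", "rain", "snow", "snowfall",
--         "cloud", "wind", "gust", "pressure", "humidity", "daylight", "sunrise", "sunset",
--         "uv", "weather", "is_day", "rain_streak", "freeze", "hot_streak",
--     ]
--     biology_keys = [
--         "samsung", "heart", "hr", "stress", "sleep", "steps", "exercise", "active",
--         "resting", "vo2", "oxygen", "resp", "calories_burned", "bmr", "weight_",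
--         "weightvelocity", "weight_velocity", "noom_weight",
--     ]
--     meal_keys = [
--         "meal_", "noom_food", "restaurant_", "cuisine", "archetype", "protein", "carb",
--         "fat", "fiber", "dessert", "beverage", "snack", "breakfast", "lunch", "dinner",
--         "satiety", "indulgence", "comfort_food", "service_form", "prep_profile",
--         "distinct_meal", "distinct_cuisines", "restaurant_specific", "food_",
--     ]
--     temporal_keys = [
--         "period_", "month", "quarter", "weekofyear", "dayofyear", "doy_", "season",
--         "days_since_start", "year",
--     ]
--     if any(k in c for k in weather_keys):
--         return "weather_daylight"
--     if any(k in c for k in biology_keys):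
--         return "biology"
--     if any(k in c for k in meal_keys):
--         return "meals"
--     if any(k in c for k in temporal_keys):
--         return "temporal"
--     return "other"
--
-- def build_ablation_sets(columns: List[str]) -> Dict[str, List[str]]:
--     groups = {c: classify_feature_group(c) for c in columns}
--     all_cols = list(columns)
--     out = {"full": all_cols}
--     for grp in ["meals", "biology", "weather_daylight", "temporal", "other"]:
--         out[f"drop_{grp}"] = [c for c in all_cols if groups[c] != grp]
--     for grp in ["meals", "biology", "weather_daylight", "temporal"]:
--         grp_cols = [c for c in all_cols if groups[c] == grp]
--         if grp_cols:
--             out[f"{grp}_only"] = grp_cols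
--     return out
-- ===== SOURCE B (Python) =====
-- from typing import Dict, List
--
-- _GROUP_KEYWORDS = [
--     ("weather_daylight", [
--         "temperature", "apparent_temperature", "precip", "rain", "snow", "snowfall",
--         "cloud", "wind", "gust", "pressure", "humidity", "daylight", "sunrise", "sunset",
--         "uv", "weather", "is_day", "rain_streak", "freeze", "hot_streak",
--     ]),
--     ("biology", [
--         "samsung", "heart", "hr", "stress", "sleep", "steps", "exercise", "active",
--         "resting", "vo2", "oxygen", "resp", "calories_burned", "bmr", "weight_",
--         "weightvelocity", "weight_velocity", "noom_weight",
--     ]),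
--     ("meals", [
--         "meal_", "noom_food", "restaurant_", "cuisine", "archetype", "protein", "carb",
--         "fat", "fiber", "dessert", "beverage", "snack", "breakfast", "lunch", "dinner",
--         "satiety", "indulgence", "comfort_food", "service_form", "prep_profile",
--         "distinct_meal", "distinct_cuisines", "restaurant_specific", "food_",
--     ]),
--     ("temporal", [
--         "period_", "month", "quarter", "weekofyear", "dayofyear", "doy_", "season",
--         "days_since_start", "year",
--     ]),
-- ]
--
-- def classify_feature_group(col: str) -> str:
--     c = col.lower()
--     for name, keys in _GROUP_KEYWORDS:
--         if any(k in c for k in keys):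
--             return name
--     return "other"
--
-- def build_ablation_sets(columns: List[str]) -> Dict[str, List[str]]:
--     # one distributing pass: each column is classified once and appended to
--     # every drop_* bucket except its own group, and to its *_only bucket
--     drop_meals = []
--     drop_biology = []
--     drop_weather = []
--     drop_temporal = []
--     drop_other = []
--     meals_only = []
--     biology_only = []
--     weather_only = []
--     temporal_only = []
--     for c in columns:
--         g = classify_feature_group(c)
--         if g != "meals":
--             drop_meals.append(c)
--         else:
--             meals_only.append(c)
--         if g != "biology":
--             drop_biology.append(c)
--         else:
--             biology_only.append(c)
--         if g != "weather_daylight":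
--             drop_weather.append(c)
--         else:
--             weather_only.append(c)
--         if g != "temporal":
--             drop_temporal.append(c)
--         else:
--             temporal_only.append(c)
--         if g != "other":
--             drop_other.append(c)
--     out = {
--         "full": list(columns),
--         "drop_meals": drop_meals,
--         "drop_biology": drop_biology,
--         "drop_weather_daylight": drop_weather,
--         "drop_temporal": drop_temporal,
--         "drop_other": drop_other,
--     }
--     for name, bucket in [("meals_only", meals_only), ("biology_only", biology_only),
--                          ("weather_daylight_only", weather_only), ("temporal_only", temporal_only)]:
--         if bucket:
--             out[name] = bucket
--     return out
-- ===== Notes on version B (the rewrite author's own statement) =====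
-- stated objective: alternative
-- what changed: Replaces the precomputed per-column dict plus nine separate filter rescans of the column list with a single forward pass that classifies each column once and distributes it into the five drop_* lists and four *_only buckets, assembling the output dict afterwards.
import Mathlib
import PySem

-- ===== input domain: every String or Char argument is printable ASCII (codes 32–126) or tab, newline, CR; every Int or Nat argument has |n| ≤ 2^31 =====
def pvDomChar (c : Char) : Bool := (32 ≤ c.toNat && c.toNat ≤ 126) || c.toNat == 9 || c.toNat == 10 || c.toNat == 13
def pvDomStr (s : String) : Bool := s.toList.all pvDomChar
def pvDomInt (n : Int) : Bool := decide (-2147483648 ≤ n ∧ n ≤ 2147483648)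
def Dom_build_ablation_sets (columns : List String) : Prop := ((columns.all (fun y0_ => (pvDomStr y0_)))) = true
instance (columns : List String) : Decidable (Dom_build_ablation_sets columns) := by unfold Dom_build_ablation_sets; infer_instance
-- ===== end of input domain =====

-- B replaces A's per-column group dict and nine filter rescans of the column list by one
-- forward pass that distributes each column into its drop_*/ *_only buckets (alternative decomposition, same cost).


-- ===== PORT A =====
def weather_keys : List String :=
  ["temperature", "apparent_temperature", "precip", "rain", "snow", "snowfall",
   "cloud", "wind", "gust", "pressure", "humidity", "daylight", "sunrise", "sunset",
   "uv", "weather", "is_day", "rain_streak", "freeze", "hot_streak"]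
def biology_keys : List String :=
  ["samsung", "heart", "hr", "stress", "sleep", "steps", "exercise", "active",
   "resting", "vo2", "oxygen", "resp", "calories_burned", "bmr", "weight_",
   "weightvelocity", "weight_velocity", "noom_weight"]
def meal_keys : List String :=
  ["meal_", "noom_food", "restaurant_", "cuisine", "archetype", "protein", "carb",
   "fat", "fiber", "dessert", "beverage", "snack", "breakfast", "lunch", "dinner",
   "satiety", "indulgence", "comfort_food", "service_form", "prep_profile",
   "distinct_meal", "distinct_cuisines", "restaurant_specific", "food_"]
def temporal_keys : List String :=
  ["period_", "month", "quarter", "weekofyear", "dayofyear", "doy_", "season",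
   "days_since_start", "year"]

def classify_feature_group (col : String) : String :=
  let c := PySem.Str.lower col
  if weather_keys.any (fun k => PySem.Str.isIn k c) then "weather_daylight"
  else if biology_keys.any (fun k => PySem.Str.isIn k c) then "biology"
  else if meal_keys.any (fun k => PySem.Str.isIn k c) then "meals"
  else if temporal_keys.any (fun k => PySem.Str.isIn k c) then "temporal"
  else "other"

def build_ablation_sets (columns : List String) : List (String × List String) :=
  let groups : PySem.Dict String String :=
    columns.foldl (fun d c => d.insert c (classify_feature_group c)) PySem.Dict.empty
  let all_cols := columns
  let out : PySem.Dict String (List String) := PySem.Dict.empty.insert "full" all_cols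
  let out := ["meals", "biology", "weather_daylight", "temporal", "other"].foldl
    (fun out grp =>
      out.insert ("drop_" ++ grp)
        (all_cols.filter (fun c => !(((groups.get? c).getD "") == grp)))) out
  let out := ["meals", "biology", "weather_daylight", "temporal"].foldl
    (fun out grp =>
      let grp_cols := all_cols.filter (fun c => ((groups.get? c).getD "") == grp)
      if grp_cols ≠ [] then out.insert (grp ++ "_only") grp_cols else out) out
  out.items

-- ===== PORT B =====
def group_keywords : List (String × List String) :=
  [("weather_daylight", weather_keys), ("biology", biology_keys),
   ("meals", meal_keys), ("temporal", temporal_keys)]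

def classifyGo (c : String) : List (String × List String) → String
  | [] => "other"
  | (name, keys) :: rest =>
      if keys.any (fun k => PySem.Str.isIn k c) then name else classifyGo c rest

def classify_feature_group_alt (col : String) : String :=
  let c := PySem.Str.lower col
  classifyGo c group_keywords

-- the body of Source B's single distributing loop, one iteration
def stepB (s : List String × List String × List String × List String × List String ×
      List String × List String × List String × List String) (c : String) :
    List String × List String × List String × List String × List String ×
      List String × List String × List String × List String :=
  match s with
  | (dm, db, dw, dt, dO, om, ob, ow, ot) =>
    let g := classify_feature_group_alt c
    (if g ≠ "meals" then dm ++ [c] else dm,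
     if g ≠ "biology" then db ++ [c] else db,
     if g ≠ "weather_daylight" then dw ++ [c] else dw,
     if g ≠ "temporal" then dt ++ [c] else dt,
     if g ≠ "other" then dO ++ [c] else dO,
     if g = "meals" then om ++ [c] else om,
     if g = "biology" then ob ++ [c] else ob,
     if g = "weather_daylight" then ow ++ [c] else ow,
     if g = "temporal" then ot ++ [c] else ot)

def build_ablation_sets_alt (columns : List String) : List (String × List String) :=
  let st := columns.foldl stepB ([], [], [], [], [], [], [], [], [])
  match st with
  | (dm, db, dw, dt, dO, om, ob, ow, ot) =>
    let out : PySem.Dict String (List String) := PySem.Dict.ofList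
      [("full", columns), ("drop_meals", dm), ("drop_biology", db),
       ("drop_weather_daylight", dw), ("drop_temporal", dt), ("drop_other", dO)]
    let out := [("meals_only", om), ("biology_only", ob),
                ("weather_daylight_only", ow), ("temporal_only", ot)].foldl
      (fun out p => if p.2 ≠ [] then out.insert p.1 p.2 else out) out
    out.items

-- ===== PRECONDITION & SPEC =====
def Spec_build_ablation_sets (columns : List String) (out : List (String × List String)) : Prop := out = build_ablation_sets_alt columns
instance (columns : List String) (out : List (String × List String)) : Decidable (Spec_build_ablation_sets columns out) := by unfold Spec_build_ablation_sets; infer_instance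

-- ===== CLAIM (what is proved, stated in full; the proofs are below) =====
def Claim_equal_build_ablation_sets : Prop := ∀ (columns : List String), Dom_build_ablation_sets columns → Spec_build_ablation_sets columns (build_ablation_sets columns)

-- ===== LEMMAS AND PROOFS =====

def onlyL (g : String) (xs : List String) : List String :=
  xs.filter (fun c => classify_feature_group c == g)
def dropL (g : String) (xs : List String) : List String :=
  xs.filter (fun c => !(classify_feature_group c == g))

theorem groups_get (xs : List String) (d : PySem.Dict String String) (c : String) :
    ((xs.foldl (fun d c => d.insert c (classify_feature_group c)) d).get? c) =
      (if c ∈ xs then some (classify_feature_group c) else d.get? c) := by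
  induction xs generalizing d with
  | nil => simp
  | cons x t ih =>
      simp only [List.foldl_cons, ih, List.mem_cons]
      by_cases hc : c ∈ t
      · simp [hc]
      · by_cases hx : c = x
        · subst hx; simp [hc, PySem.Dict.get?_insert_self]
        · simp [hc, hx, PySem.Dict.get?_insert_of_ne _ _ hx]

theorem cond_drop (g s x : String) (l L : List String) :
    (if g ≠ s then l ++ [x] else l) ++ L = l ++ (if (!(g == s)) = true then x :: L else L) := by
  by_cases h : g = s <;> simp [h]

theorem cond_only (g s x : String) (l L : List String) :
    (if g = s then l ++ [x] else l) ++ L = l ++ (if (g == s) = true then x :: L else L) := by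
  by_cases h : g = s <;> simp [h]

theorem stepB_eq (dm db dw dt dO om ob ow ot : List String) (c : String) :
    stepB (dm, db, dw, dt, dO, om, ob, ow, ot) c =
    (if classify_feature_group c ≠ "meals" then dm ++ [c] else dm,
     if classify_feature_group c ≠ "biology" then db ++ [c] else db,
     if classify_feature_group c ≠ "weather_daylight" then dw ++ [c] else dw,
     if classify_feature_group c ≠ "temporal" then dt ++ [c] else dt,
     if classify_feature_group c ≠ "other" then dO ++ [c] else dO,
     if classify_feature_group c = "meals" then om ++ [c] else om,
     if classify_feature_group c = "biology" then ob ++ [c] else ob,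
     if classify_feature_group c = "weather_daylight" then ow ++ [c] else ow,
     if classify_feature_group c = "temporal" then ot ++ [c] else ot) := rfl

theorem foldB (xs : List String)
    (dm db dw dt dO om ob ow ot : List String) :
    xs.foldl stepB (dm, db, dw, dt, dO, om, ob, ow, ot) =
    (dm ++ dropL "meals" xs, db ++ dropL "biology" xs, dw ++ dropL "weather_daylight" xs,
     dt ++ dropL "temporal" xs, dO ++ dropL "other" xs,
     om ++ onlyL "meals" xs, ob ++ onlyL "biology" xs,
     ow ++ onlyL "weather_daylight" xs, ot ++ onlyL "temporal" xs) := by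
  induction xs generalizing dm db dw dt dO om ob ow ot with
  | nil => simp [dropL, onlyL]
  | cons x t ih =>
      rw [List.foldl_cons, stepB_eq, ih]
      simp only [dropL, onlyL, List.filter_cons]
      generalize classify_feature_group x = g
      simp only [cond_drop, cond_only]

-- ===== VERDICT (by name: the statement is the Claim_ definition above) =====
theorem build_ablation_sets_spec : Claim_equal_build_ablation_sets := by
  intro columns _
  unfold Spec_build_ablation_sets build_ablation_sets build_ablation_sets_alt
  simp only [foldB, List.nil_append]
  have hget : ∀ c ∈ columns,
      (((columns.foldl (fun d c => d.insert c (classify_feature_group c))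
          PySem.Dict.empty).get? c).getD "") = classify_feature_group c := by
    intro c hc; rw [groups_get]; simp [hc]
  have hdrop : ∀ grp : String,
      columns.filter (fun c => !(((columns.foldl
          (fun d c => d.insert c (classify_feature_group c))
          PySem.Dict.empty).get? c).getD "" == grp)) = dropL grp columns := by
    intro grp
    exact List.filter_congr (fun c hc => by rw [hget c hc])
  have honly : ∀ grp : String,
      columns.filter (fun c => (((columns.foldl
          (fun d c => d.insert c (classify_feature_group c))
          PySem.Dict.empty).get? c).getD "" == grp)) = onlyL grp columns := by
    intro grp
    exact List.filter_congr (fun c hc => by rw [hget c hc])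
  simp only [List.foldl_cons, List.foldl_nil, hdrop, honly]
  generalize onlyL "meals" columns = qm
  generalize onlyL "biology" columns = qb
  generalize onlyL "weather_daylight" columns = qw
  generalize onlyL "temporal" columns = qt
  generalize dropL "meals" columns = rm
  generalize dropL "biology" columns = rb
  generalize dropL "weather_daylight" columns = rw_
  generalize dropL "temporal" columns = rt
  generalize dropL "other" columns = rO
  split_ifs <;> rfl
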